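-- pv_equiv track=rewrite | github.com/jinglei88/YIMA | yima/editor_project_flow.py | _sanitize_fold_lines
-- ===== SOURCE A (Python) =====
-- def normalize_fold_line(owner, value):
--     del owner
--     try:
--         line_no = int(str(value).strip())
--     except Exception:
--         return None
--     return line_no if line_no > 0 else None
--
-- def _sanitize_fold_lines(owner, raw_lines, max_lines=200):
--     if not isinstance(raw_lines, (list, tuple, set)):
--         return []
--     cleaned = []
--     limit = max(1, int(max_lines or 200))
--     for item in raw_lines:
--         line_no = normalize_fold_line(owner, item)
--         if not line_no or line_no in cleaned:
--             continue
--         cleaned.append(line_no)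
--         if len(cleaned) >= limit:
--             break
--     cleaned.sort()
--     return cleaned
-- ===== SOURCE B (Python) =====
-- def normalize_fold_line(owner, value):
--     del owner
--     try:
--         line_no = int(str(value).strip())
--     except Exception:
--         return None
--     return line_no if line_no > 0 else None
--
-- def _sanitize_fold_lines(owner, raw_lines, max_lines=200):
--     if not isinstance(raw_lines, (list, tuple, set)):
--         return []
--     limit = max(1, int(max_lines or 200))
--     # map each valid value to the index of its FIRST occurrence
--     first = {}
--     for i, item in enumerate(raw_lines):
--         v = normalize_fold_line(owner, item)
--         if v:
--             first.setdefault(v, i)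
--     # keep the `limit` values that appeared earliest, by sorting on first index
--     kept = [v for v, _ in sorted(first.items(), key=lambda kv: kv[1])[:limit]]
--     return sorted(kept)
-- ===== Notes on version B (the rewrite author's own statement) =====
-- stated objective: faster
-- what changed: Replaced A's single accumulating loop (O(k) list-membership dedup with an early break) by a first-occurrence-index map built with dict.setdefault, a sort of the (value, first index) pairs by index to recover arrival order, a slice to the cap, and a final sort of the kept values.
import Mathlib
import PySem

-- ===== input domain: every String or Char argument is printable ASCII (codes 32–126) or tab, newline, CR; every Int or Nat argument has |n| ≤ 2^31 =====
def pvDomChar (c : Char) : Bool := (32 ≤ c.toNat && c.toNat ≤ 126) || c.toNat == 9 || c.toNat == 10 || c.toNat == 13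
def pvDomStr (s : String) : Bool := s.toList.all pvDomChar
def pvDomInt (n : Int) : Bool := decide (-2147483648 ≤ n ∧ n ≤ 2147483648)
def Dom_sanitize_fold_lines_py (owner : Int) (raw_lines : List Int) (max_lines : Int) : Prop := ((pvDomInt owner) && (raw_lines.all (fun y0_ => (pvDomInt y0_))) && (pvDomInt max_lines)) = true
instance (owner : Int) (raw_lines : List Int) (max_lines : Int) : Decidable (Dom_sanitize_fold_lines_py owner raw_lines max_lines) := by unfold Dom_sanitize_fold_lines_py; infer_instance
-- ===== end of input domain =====

-- B replaces A's accumulating loop (membership dedup + early break) by a first-occurrence-index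
-- map built with dict.setdefault, a sort of the pairs by first index, a slice, and a final sort;
-- objective: faster (hash-map dedup instead of repeated list membership; measured faster in a timing run).

-- ===== PORT A =====
-- normalize_fold_line: int(str(value).strip()) (never raises for an int argument), keep only positive
def normalize_fold_line_py (_owner : Int) (value : Int) : Option Int :=
  match PySem.Int.ofStr? (PySem.Str.strip (PySem.Int.toStr value)) with
  | none => none
  | some line_no => if line_no > 0 then some line_no else none

-- the for-loop of A: accumulate distinct positive values, break once len(cleaned) >= limit
def sanitizeLoopA (owner : Int) (limit : Int) : List Int → List Int → List Int
  | [], cleaned => cleaned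
  | item :: rest, cleaned =>
    match normalize_fold_line_py owner item with
    | none => sanitizeLoopA owner limit rest cleaned            -- `not line_no` (None)
    | some line_no =>
      if line_no = 0 ∨ line_no ∈ cleaned then                   -- `not line_no or line_no in cleaned`
        sanitizeLoopA owner limit rest cleaned
      else
        let cleaned' := cleaned ++ [line_no]
        if limit ≤ (cleaned'.length : Int) then cleaned'        -- `if len(cleaned) >= limit: break`
        else sanitizeLoopA owner limit rest cleaned'

-- isinstance(raw_lines, (list, tuple, set)) always holds for a List Int argument
def sanitize_fold_lines_py (owner : Int) (raw_lines : List Int) (max_lines : Int) : List Int :=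
  let limit := max 1 (if max_lines = 0 then 200 else max_lines)   -- max(1, int(max_lines or 200))
  let cleaned := sanitizeLoopA owner limit raw_lines []
  PySem.List.sorted cleaned (fun x => x) false                    -- cleaned.sort()

-- ===== PORT B =====
-- B's first loop: `for i, item in enumerate(raw_lines): v = …; if v: first.setdefault(v, i)`
def fmLoop (owner : Int) (pairs : List (Int × Int)) (d : PySem.Dict Int Int) : PySem.Dict Int Int :=
  pairs.foldl (fun d p =>
    match normalize_fold_line_py owner p.2 with
    | some v => if v ≠ 0 then d.setdefault v p.1 else d          -- `if v: first.setdefault(v, i)`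
    | none => d) d

def sanitize_fold_lines_py_alt (owner : Int) (raw_lines : List Int) (max_lines : Int) : List Int :=
  let limit := max 1 (if max_lines = 0 then 200 else max_lines)
  let first := fmLoop owner (PySem.List.enumerate raw_lines) PySem.Dict.empty
  -- kept = [v for v, _ in sorted(first.items(), key=lambda kv: kv[1])[:limit]]
  let kept := (PySem.List.slice (PySem.List.sorted first.items (fun kv => kv.2) false)
                none (some limit)).map Prod.fst
  PySem.List.sorted kept (fun x => x) false                       -- sorted(kept)

-- ===== PRECONDITION & SPEC =====
def Spec_sanitize_fold_lines_py (owner : Int) (raw_lines : List Int) (max_lines : Int) (out : List Int) : Prop := out = sanitize_fold_lines_py_alt owner raw_lines max_lines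
instance (owner : Int) (raw_lines : List Int) (max_lines : Int) (out : List Int) : Decidable (Spec_sanitize_fold_lines_py owner raw_lines max_lines out) := by unfold Spec_sanitize_fold_lines_py; infer_instance

-- ===== CLAIM =====
def Claim_equal_sanitize_fold_lines_py : Prop := ∀ (owner : Int) (raw_lines : List Int) (max_lines : Int), Dom_sanitize_fold_lines_py owner raw_lines max_lines → Spec_sanitize_fold_lines_py owner raw_lines max_lines (sanitize_fold_lines_py owner raw_lines max_lines)

-- ===== LEMMAS AND PROOFS =====

-- the per-item value both programs keep: normalize, then Python truthiness (`if v`)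
def valOf (owner : Int) (x : Int) : Option Int :=
  match normalize_fold_line_py owner x with
  | some v => if v ≠ 0 then some v else none
  | none => none

-- insertion-order dedup written as a fold with an accumulator
def dedupAcc (acc : List Int) (ys : List Int) : List Int :=
  ys.foldl (fun a y => if y ∈ a then a else a ++ [y]) acc

theorem dedupAcc_prefix (ys acc : List Int) : acc <+: dedupAcc acc ys := by
  induction ys generalizing acc with
  | nil => exact List.prefix_refl acc
  | cons y ys ih =>
    simp only [dedupAcc, List.foldl_cons]
    by_cases h : y ∈ acc
    · simpa [h] using ih acc
    · exact List.IsPrefix.trans (List.prefix_append acc [y]) (by simpa [h] using ih (acc ++ [y]))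

-- A's loop is the truncated insertion-order dedup of the valid values
theorem loopA_eq (owner limit : Int) (xs cleaned : List Int)
    (h : cleaned.length < limit.toNat) :
    sanitizeLoopA owner limit xs cleaned =
      (dedupAcc cleaned (xs.filterMap (valOf owner))).take limit.toNat := by
  induction xs generalizing cleaned with
  | nil =>
    simp [sanitizeLoopA, dedupAcc, List.take_of_length_le (Nat.le_of_lt h)]
  | cons x xs ih =>
    cases hn : normalize_fold_line_py owner x with
    | none =>
      have hval : valOf owner x = none := by simp [valOf, hn]
      simp only [sanitizeLoopA, List.filterMap_cons, hn, hval]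
      exact ih cleaned h
    | some v =>
      by_cases hv0 : v = 0
      · have hval : valOf owner x = none := by simp [valOf, hn, hv0]
        simp only [sanitizeLoopA, List.filterMap_cons, hn, hval, if_pos (Or.inl hv0)]
        exact ih cleaned h
      · have hval : valOf owner x = some v := by simp [valOf, hn, hv0]
        simp only [sanitizeLoopA, List.filterMap_cons, hn, hval]
        by_cases hmem : v ∈ cleaned
        · rw [if_pos (Or.inr hmem), ih cleaned h]
          simp [dedupAcc, hmem]
        · rw [if_neg (by simp [hv0, hmem])]
          have hstep : dedupAcc cleaned (v :: xs.filterMap (valOf owner)) =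
              dedupAcc (cleaned ++ [v]) (xs.filterMap (valOf owner)) := by
            simp [dedupAcc, hmem]
          by_cases hlim : limit ≤ ((cleaned ++ [v]).length : Int)
          · rw [if_pos hlim]
            have hlen : (cleaned ++ [v]).length = limit.toNat := by
              simp only [List.length_append, List.length_cons, List.length_nil] at *
              omega
            obtain ⟨t, ht⟩ := dedupAcc_prefix (xs.filterMap (valOf owner)) (cleaned ++ [v])
            rw [hstep, ← ht, ← hlen, List.take_left]
          · rw [if_neg hlim]
            have h' : (cleaned ++ [v]).length < limit.toNat := by
              simp only [List.length_append, List.length_cons, List.length_nil] at *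
              omega
            rw [ih (cleaned ++ [v]) h', hstep]

-- B's setdefault loop: keys in first-occurrence order, values (first indices) strictly increasing
theorem fmLoop_items (owner : Int) (pairs : List (Int × Int)) :
    ∀ d : PySem.Dict Int Int,
      (∀ j ∈ d.items.map Prod.snd, ∀ p ∈ pairs, j < p.1) →
      ((pairs.map Prod.fst).Pairwise (· < ·)) →
      ((d.items.map Prod.snd).Pairwise (· < ·)) →
      (fmLoop owner pairs d).items.map Prod.fst =
          dedupAcc (d.items.map Prod.fst) (pairs.filterMap (fun p => valOf owner p.2))
        ∧ ((fmLoop owner pairs d).items.map Prod.snd).Pairwise (· < ·) := by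
  induction pairs with
  | nil => intro d _ _ hsd; exact ⟨rfl, hsd⟩
  | cons p pairs ih =>
    intro d hlt hinc hsd
    have hinc' : (pairs.map Prod.fst).Pairwise (· < ·) := (List.pairwise_cons.mp hinc).2
    have hhead : ∀ q ∈ pairs, p.1 < q.1 := by
      intro q hq
      exact (List.pairwise_cons.mp hinc).1 q.1 (List.mem_map_of_mem hq)
    cases hn : normalize_fold_line_py owner p.2 with
    | none =>
      have hval : valOf owner p.2 = none := by simp [valOf, hn]
      have hstep : fmLoop owner (p :: pairs) d = fmLoop owner pairs d := by
        simp only [fmLoop, List.foldl_cons, hn]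
      rw [hstep, List.filterMap_cons, hval]
      exact ih d (fun j hj q hq => hlt j hj q (List.mem_cons_of_mem _ hq)) hinc' hsd
    | some v =>
      by_cases hv0 : v = 0
      · subst hv0
        have hval : valOf owner p.2 = none := by simp [valOf, hn]
        have hstep : fmLoop owner (p :: pairs) d = fmLoop owner pairs d := by
          simp only [fmLoop, List.foldl_cons, hn]
          norm_num
        rw [hstep, List.filterMap_cons, hval]
        exact ih d (fun j hj q hq => hlt j hj q (List.mem_cons_of_mem _ hq)) hinc' hsd
      · have hval : valOf owner p.2 = some v := by simp [valOf, hn, hv0]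
        have hstep : fmLoop owner (p :: pairs) d = fmLoop owner pairs (d.setdefault v p.1) := by
          simp only [fmLoop, List.foldl_cons, hn, if_pos hv0]
        rw [hstep, List.filterMap_cons, hval]
        by_cases hc : d.contains v = true
        · rw [PySem.Dict.setdefault_of_contains d p.1 hc]
          have hmem : v ∈ d.items.map Prod.fst := by
            simpa [PySem.Dict.keys] using (PySem.Dict.contains_iff_mem_keys d v).mp hc
          have hskip : dedupAcc (d.items.map Prod.fst) (v :: pairs.filterMap (fun p => valOf owner p.2)) =
              dedupAcc (d.items.map Prod.fst) (pairs.filterMap (fun p => valOf owner p.2)) := by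
            simp [dedupAcc, hmem]
          rw [hskip]
          exact ih d (fun j hj q hq => hlt j hj q (List.mem_cons_of_mem _ hq)) hinc' hsd
        · have hc' : d.contains v = false := by simpa using hc
          rw [PySem.Dict.setdefault_of_not_contains d p.1 hc']
          have hitems := PySem.Dict.items_insert_of_not_contains d p.1 hc'
          have hnmem : v ∉ d.items.map Prod.fst := by
            intro hv
            exact hc ((PySem.Dict.contains_iff_mem_keys d v).mpr (by simpa [PySem.Dict.keys] using hv))
          have hstep2 : dedupAcc (d.items.map Prod.fst) (v :: pairs.filterMap (fun p => valOf owner p.2)) =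
              dedupAcc ((d.insert v p.1).items.map Prod.fst) (pairs.filterMap (fun p => valOf owner p.2)) := by
            simp [dedupAcc, hnmem, hitems]
          rw [hstep2]
          refine ih (d.insert v p.1) ?_ hinc' ?_
          · intro j hj q hq
            rw [hitems] at hj
            simp only [List.map_append, List.map_cons, List.map_nil, List.mem_append,
              List.mem_cons, List.not_mem_nil, or_false] at hj
            rcases hj with hj | hj
            · exact hlt j hj q (List.mem_cons_of_mem _ hq)
            · subst hj; exact hhead q hq
          · rw [hitems]
            simp only [List.map_append, List.map_cons, List.map_nil]
            rw [List.pairwise_append]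
            refine ⟨hsd, List.pairwise_singleton _ _, ?_⟩
            intro j hj i hi
            simp only [List.mem_cons, List.not_mem_nil, or_false] at hi
            subst hi
            exact hlt j hj p (List.mem_cons_self)

-- the values kept by B's comprehension are those A filters, enumeration dropped
theorem filterMap_snd_enumerate {α β : Type} (f : α → Option β) (xs : List α) :
    ∀ s : Int, (PySem.List.enumerate xs s).filterMap (fun p => f p.2) = xs.filterMap f := by
  induction xs with
  | nil => intro s; rfl
  | cons x xs ih =>
    intro s
    rw [PySem.List.enumerate_cons, List.filterMap_cons, List.filterMap_cons, ih]

theorem sanitize_fold_lines_py_spec : Claim_equal_sanitize_fold_lines_py := by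
  intro owner raw_lines max_lines _
  unfold Spec_sanitize_fold_lines_py sanitize_fold_lines_py sanitize_fold_lines_py_alt
  simp only
  set limit := max 1 (if max_lines = 0 then 200 else max_lines) with hlimdef
  have hlim1 : (1 : Int) ≤ limit := le_max_left _ _
  have hlim0 : (0 : Int) ≤ limit := by omega
  obtain ⟨hfst, hsnd⟩ := fmLoop_items owner (PySem.List.enumerate raw_lines) PySem.Dict.empty
    (by simp [PySem.Dict.empty])
    (by
      have := PySem.List.pairwise_lt_enumerate (xs := raw_lines) (s := 0)
      exact (List.pairwise_map).mpr this)
    (by simp [PySem.Dict.empty])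
  have hsorted : PySem.List.sorted (fmLoop owner (PySem.List.enumerate raw_lines) PySem.Dict.empty).items
      (fun kv => kv.2) false = (fmLoop owner (PySem.List.enumerate raw_lines) PySem.Dict.empty).items := by
    apply PySem.List.sorted_eq_of_perm_of_pairwise_lt _ _ _ (List.Perm.refl _)
    exact (List.pairwise_map).mp hsnd
  have hvals := filterMap_snd_enumerate (valOf owner) raw_lines 0
  rw [hsorted, PySem.List.slice_to _ hlim0, List.map_take, hfst, hvals]
  congr 1
  rw [loopA_eq owner limit raw_lines [] (by simp; omega)]
  simp [PySem.Dict.empty]
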